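-- pv_equiv track=rewrite | github.com/alexpill/advent-of-code | python/2021/4/giant_squid.py | process_board
-- ===== SOURCE A (Python) =====
-- def get_matrix_column(matrix, idx):
--     return [row[idx] for row in matrix]
--
-- def is_winning_board(board, row_idx, column_idx):
--     is_winning = lambda arr: all([i[1] == 1 for i in arr])
--     if is_winning(board[row_idx]) or is_winning(get_matrix_column(board, column_idx)):
--         return True
--     return False
--
-- def process_board(board, called_number):
--     for row_idx, row in enumerate(board):
--         for column_idx, cell in enumerate(row):
--             if cell[0] == called_number:
--                 cell[1] = 1
--             if is_winning_board(board, row_idx, column_idx):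
--                 return board
--     return None
-- ===== SOURCE B (Python) =====
-- def process_board(board, called_number):
--     # Count the unmarked cells of every row and column once; marking a cell
--     # then just decrements two counters, and a counter hitting zero signals
--     # the win -- no rescanning of whole rows and columns after every cell.
--     width = len(board[0]) if board else 0
--     row_unmarked = [sum(1 for cell in row if cell[1] != 1) for row in board]
--     col_unmarked = [sum(1 for row in board if row[c][1] != 1) for c in range(width)]
--     for r, row in enumerate(board):
--         for c, cell in enumerate(row):
--             if cell[0] == called_number and cell[1] != 1:
--                 cell[1] = 1
--                 row_unmarked[r] -= 1
--                 col_unmarked[c] -= 1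
--             if row_unmarked[r] == 0 or col_unmarked[c] == 0:
--                 return board
--     return None
-- ===== Notes on version B (the rewrite author's own statement) =====
-- stated objective: faster
-- what changed: A rescans the full current row and full current column after every visited cell (O(h*w*(h+w))); B counts the unmarked cells of each row and column once up front and, while scanning, decrements two counters per mark, a counter reaching zero signalling the win (O(h*w)); Pre_ excludes non-rectangular boards and cells with fewer than 2 entries, on which Python indexing raises.
-- outside the precondition, e.g. on process_board([[[1, 1], [2, 1]], [[3, 0]]], 9): A returns [[[1, 1], [2, 1]], [[3, 0]]], B raises IndexError; on process_board([[[1, 1]], [[7]]], 9): A returns [[[1, 1]], [[7]]], B raises IndexError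
import Mathlib
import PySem

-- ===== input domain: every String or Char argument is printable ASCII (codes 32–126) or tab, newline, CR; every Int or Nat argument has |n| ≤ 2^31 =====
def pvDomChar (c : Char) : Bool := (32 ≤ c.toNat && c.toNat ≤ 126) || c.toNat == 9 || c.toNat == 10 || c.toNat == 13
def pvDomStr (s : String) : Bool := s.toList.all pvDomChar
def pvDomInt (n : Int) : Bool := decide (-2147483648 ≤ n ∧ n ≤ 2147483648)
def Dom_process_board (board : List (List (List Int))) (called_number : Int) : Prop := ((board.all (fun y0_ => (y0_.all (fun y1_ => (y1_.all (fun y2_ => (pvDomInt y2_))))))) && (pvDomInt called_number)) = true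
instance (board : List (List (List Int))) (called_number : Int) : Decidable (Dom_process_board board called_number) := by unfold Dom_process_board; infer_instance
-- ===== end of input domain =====

-- B replaces A's rescan of the full current row and column after every visited cell by
-- per-row and per-column unmarked-cell counters computed once and decremented on each mark;
-- proved equal on the RETURN value (both Pythons also mutate the board in place identically).

-- ===== PORT A =====
-- enumerate indices are Nat; under Pre_ every index below is in range, so List.getD's
-- default is never read (outside Pre_ Python raises IndexError there).
def pvMarked (cell : List Int) : Bool := cell.getD 1 0 == 1   -- i[1] == 1

-- get_matrix_column
def pvGetColumn (m : List (List (List Int))) (idx : Nat) : List (List Int) :=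
  m.map (fun row => row.getD idx [])

-- is_winning_board
def pvIsWinningBoard (board : List (List (List Int))) (r c : Nat) : Bool :=
  (board.getD r []).all pvMarked || (pvGetColumn board c).all pvMarked

-- inner 'for column_idx, cell in enumerate(row)' loop; first component true = early return
def pvACols (n : Int) (r : Nat) : List Nat → List (List (List Int)) → Bool × List (List (List Int))
  | [], board => (false, board)
  | c :: cs, board =>
      let cell := (board.getD r []).getD c []
      let board' := if cell.getD 0 0 == n
        then board.set r ((board.getD r []).set c (cell.set 1 1)) else board
      if pvIsWinningBoard board' r c then (true, board') else pvACols n r cs board'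

-- outer 'for row_idx, row in enumerate(board)' loop
def pvARows (n : Int) : List Nat → List (List (List Int)) → Option (List (List (List Int)))
  | [], _ => none
  | r :: rs, board =>
      match pvACols n r (List.range (board.getD r []).length) board with
      | (true, b) => some b
      | (false, b) => pvARows n rs b

def process_board (board : List (List (List Int))) (called_number : Int) :
    Option (List (List (List Int))) :=
  pvARows called_number (List.range board.length) board

-- ===== PORT B =====
-- 'sum(1 for cell in row if cell[1] != 1)'
def pvCntRow (cells : List (List Int)) : Int :=
  cells.foldl (fun acc cell => if !(cell.getD 1 0 == 1) then acc + 1 else acc) 0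

-- 'sum(1 for row in board if row[c][1] != 1)'
def pvCntCol (board : List (List (List Int))) (c : Nat) : Int :=
  board.foldl (fun acc row => if !((row.getD c []).getD 1 0 == 1) then acc + 1 else acc) 0

-- inner 'for c, cell in enumerate(row)' loop of B, carrying the two counter lists
def pvBCols (n : Int) (r : Nat) :
    List Nat → List (List (List Int)) → List Int → List Int →
    Bool × List (List (List Int)) × List Int × List Int
  | [], b, rc, cc => (false, b, rc, cc)
  | c :: cs, b, rc, cc =>
      let cell := (b.getD r []).getD c []
      let s :=
        if cell.getD 0 0 == n && !(cell.getD 1 0 == 1) then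
          (b.set r ((b.getD r []).set c (cell.set 1 1)),
           rc.set r (rc.getD r 0 - 1), cc.set c (cc.getD c 0 - 1))
        else (b, rc, cc)
      if s.2.1.getD r 0 == 0 || s.2.2.getD c 0 == 0 then (true, s)
      else pvBCols n r cs s.1 s.2.1 s.2.2

-- outer 'for r, row in enumerate(board)' loop of B
def pvBRows (n : Int) :
    List Nat → List (List (List Int)) → List Int → List Int →
    Option (List (List (List Int)))
  | [], _, _, _ => none
  | r :: rs, b, rc, cc =>
      match pvBCols n r (List.range (b.getD r []).length) b rc cc with
      | (true, b', _, _) => some b'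
      | (false, b', rc', cc') => pvBRows n rs b' rc' cc'

def process_board_alt (board : List (List (List Int))) (called_number : Int) :
    Option (List (List (List Int))) :=
  let w := (board.headD []).length
  pvBRows called_number (List.range board.length) board
    (board.map pvCntRow) ((List.range w).map (pvCntCol board))

-- ===== PRECONDITION & SPEC =====
-- Pre_ excludes exactly the boards on which Python indexing raises: non-rectangular boards
-- and boards with a cell of fewer than 2 entries (A raises IndexError on almost all of
-- them; on the few where a win is detected before the bad access A returns but B raises
-- while computing its initial counters).
def Pre_process_board (board : List (List (List Int))) (called_number : Int) : Prop :=
  (∀ row ∈ board, row.length = (board.headD []).length) ∧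
  (∀ row ∈ board, ∀ cell ∈ row, 2 ≤ cell.length)

instance (board : List (List (List Int))) (called_number : Int) :
    Decidable (Pre_process_board board called_number) := by
  unfold Pre_process_board; infer_instance

def pvWitness_process_board : List (List (List Int)) × Int :=
  ([[[1, 0], [2, 0]], [[3, 0], [4, 1]]], 3)

def Spec_process_board (board : List (List (List Int))) (called_number : Int)
    (out : Option (List (List (List Int)))) : Prop := out = process_board_alt board called_number
instance (board : List (List (List Int))) (called_number : Int)
    (out : Option (List (List (List Int)))) : Decidable (Spec_process_board board called_number out) := by
  unfold Spec_process_board; infer_instance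

-- ===== CLAIM (what is proved, stated in full; the proofs are below) =====
def Claim_equal_process_board : Prop := ∀ (board : List (List (List Int))) (called_number : Int), Dom_process_board board called_number → Pre_process_board board called_number → Spec_process_board board called_number (process_board board called_number)

-- ===== LEMMAS AND PROOFS =====

-- number of unmarked cells, as a Nat
def gCnt (cells : List (List Int)) : Nat := cells.countP (fun cell => !(cell.getD 1 0 == 1))

-- well-formedness carried through the scan: rectangular of width w, cells of length ≥ 2
def gWF (w : Nat) (b : List (List (List Int))) : Prop :=
  ∀ row ∈ b, row.length = w ∧ ∀ cell ∈ row, 2 ≤ cell.length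

-- counter invariant
def gInv (w : Nat) (b : List (List (List Int))) (rc cc : List Int) : Prop :=
  rc.length = b.length ∧ cc.length = w ∧
  (∀ i, i < b.length → rc.getD i 0 = (gCnt (b.getD i []) : Int)) ∧
  (∀ c, c < w → cc.getD c 0 = (gCnt (b.map (fun row => row.getD c [])) : Int))

theorem foldl_count {α : Type} (p : α → Bool) (l : List α) (a : Int) :
    l.foldl (fun acc x => if p x then acc + 1 else acc) a = a + l.countP p := by
  induction l generalizing a with
  | nil => simp
  | cons x xs ih =>
    rw [List.foldl_cons, List.countP_cons, ih]
    by_cases hp : p x = true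
    · simp only [hp, if_true]; push_cast; ring
    · simp only [hp, if_false, Bool.false_eq_true]; push_cast; ring

theorem cntRow_eq (cells : List (List Int)) : pvCntRow cells = (gCnt cells : Int) := by
  unfold pvCntRow gCnt
  rw [foldl_count]; ring

theorem cntCol_eq (b : List (List (List Int))) (c : Nat) :
    pvCntCol b c = (gCnt (b.map (fun row => row.getD c [])) : Int) := by
  unfold pvCntCol gCnt
  rw [foldl_count, List.countP_map]
  rw [Int.zero_add]
  rfl

theorem gCnt_eq_zero (cells : List (List Int)) :
    ((gCnt cells : Int) == 0) = cells.all pvMarked := by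
  unfold gCnt pvMarked
  apply Bool.coe_iff_coe.mp
  rw [beq_iff_eq, Int.natCast_eq_zero, List.countP_eq_zero, List.all_eq_true]
  constructor
  · intro h cell hm
    have := h cell hm
    simpa using this
  · intro h a ha
    have h2 := h a ha
    simp only [Bool.not_eq_true]
    rw [h2]
    rfl

theorem countP_set_add {α : Type} (p : α → Bool) (l : List α) (i : Nat) (x : α)
    (hi : i < l.length) :
    (l.set i x).countP p + (if p l[i] then 1 else 0) = l.countP p + (if p x then 1 else 0) := by
  induction l generalizing i with
  | nil => simp at hi
  | cons y ys ih =>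
    cases i with
    | zero =>
      simp only [List.set_cons_zero, List.countP_cons, List.getElem_cons_zero]
      by_cases hy : p y = true <;> by_cases hx : p x = true <;> simp [hy, hx]
    | succ j =>
      have hj : j < ys.length := by simpa using hi
      have h2 := ih j hj
      simp only [List.set_cons_succ, List.countP_cons, List.getElem_cons_succ]
      by_cases hy : p y = true <;> by_cases hp : p ys[j] = true <;>
        simp [hy, hp] at h2 ⊢ <;> omega

-- win check via counters equals A's win check
theorem winEq (w : Nat) (b : List (List (List Int))) (rc cc : List Int) {r c : Nat}
    (hinv : gInv w b rc cc) (hr : r < b.length) (hc : c < w) :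
    (rc.getD r 0 == 0 || cc.getD c 0 == 0) = pvIsWinningBoard b r c := by
  obtain ⟨_, _, hrow, hcol⟩ := hinv
  unfold pvIsWinningBoard
  rw [hrow r hr, hcol c hc, gCnt_eq_zero, gCnt_eq_zero]
  rfl

-- the A-step board update
def gAStep (n : Int) (r c : Nat) (b : List (List (List Int))) : List (List (List Int)) :=
  let cell := (b.getD r []).getD c []
  if cell.getD 0 0 == n then b.set r ((b.getD r []).set c (cell.set 1 1)) else b

-- the B-step state update
def gBStep (n : Int) (r c : Nat) (b : List (List (List Int))) (rc cc : List Int) :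
    List (List (List Int)) × List Int × List Int :=
  let cell := (b.getD r []).getD c []
  if cell.getD 0 0 == n && !(cell.getD 1 0 == 1) then
    (b.set r ((b.getD r []).set c (cell.set 1 1)),
     rc.set r (rc.getD r 0 - 1), cc.set c (cc.getD c 0 - 1))
  else (b, rc, cc)

theorem pvACols_cons (n : Int) (r c : Nat) (cs : List Nat) (b : List (List (List Int))) :
    pvACols n r (c :: cs) b =
      if pvIsWinningBoard (gAStep n r c b) r c then (true, gAStep n r c b)
      else pvACols n r cs (gAStep n r c b) := rfl

theorem pvBCols_cons (n : Int) (r c : Nat) (cs : List Nat) (b : List (List (List Int)))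
    (rc cc : List Int) :
    pvBCols n r (c :: cs) b rc cc =
      if (gBStep n r c b rc cc).2.1.getD r 0 == 0 || (gBStep n r c b rc cc).2.2.getD c 0 == 0
      then (true, gBStep n r c b rc cc)
      else pvBCols n r cs (gBStep n r c b rc cc).1 (gBStep n r c b rc cc).2.1
        (gBStep n r c b rc cc).2.2 := rfl

-- one scan step: B's state update matches A's board update and preserves gWF and gInv
theorem step_lemma (n : Int) (w : Nat) (b : List (List (List Int))) (rc cc : List Int)
    {r c : Nat} (hwf : gWF w b) (hinv : gInv w b rc cc) (hr : r < b.length) (hc : c < w) :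
    (gBStep n r c b rc cc).1 = gAStep n r c b ∧ gWF w (gBStep n r c b rc cc).1 ∧
    gInv w (gBStep n r c b rc cc).1 (gBStep n r c b rc cc).2.1 (gBStep n r c b rc cc).2.2 ∧
    (gBStep n r c b rc cc).1.length = b.length := by
  set cell : List Int := (b.getD r []).getD c [] with hcd0
  set s := gBStep n r c b rc cc with hsdef
  obtain ⟨hrcl, hccl, hrow, hcol⟩ := hinv
  have hbd : b.getD r [] = b[r] := List.getD_eq_getElem _ _ hr
  have hrw : b[r].length = w := (hwf b[r] (List.getElem_mem hr)).1
  have hcr : c < b[r].length := by omega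
  have hcd : b[r].getD c [] = b[r][c] := List.getD_eq_getElem _ _ hcr
  have hcell : cell = b[r][c] := by show (b.getD r []).getD c [] = _; rw [hbd, hcd]
  have hclen : 2 ≤ cell.length := by
    rw [hcell]; exact (hwf b[r] (List.getElem_mem hr)).2 _ (List.getElem_mem hcr)
  by_cases hm : (cell.getD 0 0 == n) = true
  · by_cases hu : (cell.getD 1 0 == 1) = true
    · -- already marked: A sets the cell to itself, B does nothing
      have hcond : (cell.getD 0 0 == n && !(cell.getD 1 0 == 1)) = false := by
        rw [hm, hu]; rfl
      have hs : s = (b, rc, cc) := by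
        show (if (cell.getD 0 0 == n && !(cell.getD 1 0 == 1)) = true then _ else _) = _
        rw [hcond]; rfl
      have hset : cell.set 1 1 = cell := by
        have h1 : cell.getD 1 0 = cell[1]'(by omega) := List.getD_eq_getElem _ _ (by omega)
        have h2 : cell[1]'(by omega) = 1 := by rw [← h1]; exact_mod_cast beq_iff_eq.mp hu
        rw [← h2]; exact List.set_getElem_self ..
      have hA : gAStep n r c b = b := by
        unfold gAStep
        show (if ((b.getD r []).getD c []).getD 0 0 == n then _ else _) = b
        rw [show (b.getD r []).getD c [] = cell from rfl, if_pos hm, hset]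
        have h3 : (b.getD r []).set c cell = b.getD r [] := by
          rw [hbd, hcell]; exact List.set_getElem_self ..
        rw [h3, hbd]
        exact List.set_getElem_self ..
      rw [hs, hA]
      exact ⟨rfl, hwf, ⟨hrcl, hccl, hrow, hcol⟩, rfl⟩
    · -- mark: both set the cell; counters decrement
      have hu' : (cell.getD 1 0 == 1) = false := by rwa [Bool.not_eq_true] at hu
      have hcond : (cell.getD 0 0 == n && !(cell.getD 1 0 == 1)) = true := by
        rw [hm, hu']; rfl
      have hs : s = (b.set r ((b.getD r []).set c (cell.set 1 1)),
          rc.set r (rc.getD r 0 - 1), cc.set c (cc.getD c 0 - 1)) := by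
        show (if (cell.getD 0 0 == n && !(cell.getD 1 0 == 1)) = true then _ else _) = _
        rw [hcond]; rfl
      have hA : gAStep n r c b = b.set r ((b.getD r []).set c (cell.set 1 1)) := by
        unfold gAStep
        show (if ((b.getD r []).getD c []).getD 0 0 == n then _ else _) = _
        rw [show (b.getD r []).getD c [] = cell from rfl, if_pos hm]
      set b' := b.set r ((b.getD r []).set c (cell.set 1 1)) with hb'
      have hlen : b'.length = b.length := by rw [hb', List.length_set]
      have hwf' : gWF w b' := by
        intro row hmem
        rcases List.mem_or_eq_of_mem_set hmem with h | h
        · exact hwf row h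
        · subst h
          constructor
          · rw [List.length_set, hbd, hrw]
          · intro x hx
            rcases List.mem_or_eq_of_mem_set hx with h2 | h2
            · exact (hwf b[r] (List.getElem_mem hr)).2 _ (by rwa [← hbd])
            · subst h2; rw [List.length_set]; exact hclen
      -- the marked cell was unmarked and becomes marked
      have hpcell : (!(cell.getD 1 0 == 1)) = true := by rw [hu']; rfl
      have hpcell' : (!((cell.set 1 1).getD 1 0 == 1)) = false := by
        have h1 : (cell.set 1 1).getD 1 0 = 1 := by
          rw [List.getD_eq_getElem _ _ (by rw [List.length_set]; omega), List.getElem_set,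
            if_pos rfl]
        rw [h1]; rfl
      -- row r count decreases by one
      have hcntrow : (gCnt ((b.getD r []).set c (cell.set 1 1)) : Int)
          = (gCnt (b.getD r []) : Int) - 1 := by
        have h := countP_set_add (fun cl => !(cl.getD 1 0 == 1)) b[r] c (cell.set 1 1) hcr
        rw [show b[r][c] = cell from hcell.symm, hpcell, hpcell',
          if_pos rfl, if_neg Bool.false_ne_true] at h
        unfold gCnt
        rw [hbd]
        omega
      refine ⟨by rw [hs]; exact hA.symm, by rw [hs]; exact hwf', ?_, by rw [hs]; exact hlen⟩
      rw [hs]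
      show gInv w b' (rc.set r (rc.getD r 0 - 1)) (cc.set c (cc.getD c 0 - 1))
      refine ⟨by rw [List.length_set, hlen, hrcl], by rw [List.length_set, hccl], ?_, ?_⟩
      · -- row counters
        intro i hi
        rw [hlen] at hi
        have hgetb' : b'.getD i [] =
            (if r = i then (b.getD r []).set c (cell.set 1 1) else b.getD i []) := by
          rw [hb', List.getD_eq_getElem _ _ (by rw [List.length_set]; omega), List.getElem_set]
          split
          · rfl
          · rw [List.getD_eq_getElem _ _ hi]
        by_cases hir : i = r
        · subst hir
          rw [List.getD_eq_getElem _ _ (by rw [List.length_set]; omega), List.getElem_set,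
            if_pos rfl, hrow i hi, hgetb', if_pos rfl, hcntrow]
        · rw [List.getD_eq_getElem _ _ (by rw [List.length_set]; omega), List.getElem_set,
            if_neg (fun h => hir h.symm), ← List.getD_eq_getElem rc 0 (by omega), hrow i hi,
            hgetb', if_neg (fun h => hir h.symm)]
      · -- column counters
        intro c' hc'
        have hmlen : (b.map (fun row => row.getD c' [])).length = b.length := by simp
        have hmapset : b'.map (fun row => row.getD c' []) =
            (b.map (fun row => row.getD c' [])).set r
              (((b.getD r []).set c (cell.set 1 1)).getD c' []) := by
          rw [hb', List.map_set]
        by_cases hcc : c' = c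
        · subst hcc
          rw [List.getD_eq_getElem _ _ (by rw [List.length_set]; omega), List.getElem_set,
            if_pos rfl, hcol c' hc', hmapset]
          have hnew : ((b.getD r []).set c' (cell.set 1 1)).getD c' [] = cell.set 1 1 := by
            rw [hbd, List.getD_eq_getElem _ _ (by rw [List.length_set]; omega),
              List.getElem_set, if_pos rfl]
          rw [hnew]
          have hold : (b.map (fun row => row.getD c' []))[r]'(by omega) = cell := by
            simp only [List.getElem_map]
            rw [hcd, ← hcell]
          have h := countP_set_add (fun cl => !(cl.getD 1 0 == 1))
            (b.map (fun row => row.getD c' [])) r (cell.set 1 1) (by omega)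
          rw [hold, hpcell, hpcell', if_pos rfl, if_neg Bool.false_ne_true] at h
          unfold gCnt
          omega
        · rw [List.getD_eq_getElem _ _ (by rw [List.length_set, hccl]; omega), List.getElem_set,
            if_neg (fun h => hcc h.symm), ← List.getD_eq_getElem cc 0 (by rw [hccl]; omega),
            hcol c' hc', hmapset]
          have hsame : ((b.getD r []).set c (cell.set 1 1)).getD c' [] = b[r].getD c' [] := by
            rw [hbd]
            by_cases hlt : c' < b[r].length
            · rw [List.getD_eq_getElem _ _ (by rw [List.length_set]; omega),
                List.getElem_set, if_neg (fun h => hcc h.symm), List.getD_eq_getElem _ _ hlt]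
            · rw [List.getD_eq_default _ _ (by rw [List.length_set]; omega),
                List.getD_eq_default _ _ (by omega)]
          have hself : (b.map (fun row => row.getD c' [])).set r (b[r].getD c' [])
              = b.map (fun row => row.getD c' []) := by
            have h1 : b[r].getD c' [] = (b.map (fun row => row.getD c' []))[r]'(by omega) := by
              simp
            rw [h1]
            exact List.set_getElem_self ..
          rw [hsame, hself]
  · -- no match: both leave everything unchanged
    have hm' : (cell.getD 0 0 == n) = false := by rwa [Bool.not_eq_true] at hm
    have hcond : (cell.getD 0 0 == n && !(cell.getD 1 0 == 1)) = false := by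
      rw [hm']; rfl
    have hs : s = (b, rc, cc) := by
      show (if (cell.getD 0 0 == n && !(cell.getD 1 0 == 1)) = true then _ else _) = _
      rw [hcond]; rfl
    have hA : gAStep n r c b = b := by
      unfold gAStep
      show (if ((b.getD r []).getD c []).getD 0 0 == n then _ else _) = b
      rw [show (b.getD r []).getD c [] = cell from rfl, hm']
      rfl
    rw [hs, hA]
    exact ⟨rfl, hwf, ⟨hrcl, hccl, hrow, hcol⟩, rfl⟩

-- inner loops in lock step
theorem inner_lockstep (n : Int) (w : Nat) (r : Nat) :
    ∀ (cs : List Nat) (b : List (List (List Int))) (rc cc : List Int),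
    (∀ c ∈ cs, c < w) → gWF w b → gInv w b rc cc → r < b.length →
    pvACols n r cs b = ((pvBCols n r cs b rc cc).1, (pvBCols n r cs b rc cc).2.1) ∧
    gWF w (pvBCols n r cs b rc cc).2.1 ∧
    gInv w (pvBCols n r cs b rc cc).2.1 (pvBCols n r cs b rc cc).2.2.1 (pvBCols n r cs b rc cc).2.2.2 ∧
    (pvBCols n r cs b rc cc).2.1.length = b.length := by
  intro cs
  induction cs with
  | nil =>
    intro b rc cc _ hwf hinv hr
    exact ⟨rfl, hwf, hinv, rfl⟩
  | cons c cs ih =>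
    intro b rc cc hmem hwf hinv hr
    have hc : c < w := hmem c (List.mem_cons_self ..)
    obtain ⟨hsb, hwf', hinv', hlen⟩ := step_lemma n w b rc cc hwf hinv hr hc
    rw [pvACols_cons, pvBCols_cons]
    set s := gBStep n r c b rc cc with hsdef
    have hwin : (s.2.1.getD r 0 == 0 || s.2.2.getD c 0 == 0)
        = pvIsWinningBoard (gAStep n r c b) r c := by
      rw [← hsb]
      exact winEq w s.1 s.2.1 s.2.2 hinv' (by rw [hlen]; exact hr) hc
    rw [hwin]
    by_cases hwb : pvIsWinningBoard (gAStep n r c b) r c = true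
    · rw [if_pos hwb, if_pos hwb]
      exact ⟨by rw [hsb], hwf', hinv', hlen⟩
    · rw [if_neg hwb, if_neg hwb, ← hsb]
      obtain ⟨h1, h2, h3, h4⟩ := ih s.1 s.2.1 s.2.2
        (fun c' h => hmem c' (List.mem_cons_of_mem _ h)) hwf' hinv' (by rw [hlen]; exact hr)
      exact ⟨h1, h2, h3, by rw [h4, hlen]⟩

-- outer loops in lock step
theorem outer_lockstep (n : Int) (w : Nat) :
    ∀ (rs : List Nat) (b : List (List (List Int))) (rc cc : List Int),
    (∀ r ∈ rs, r < b.length) → gWF w b → gInv w b rc cc →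
    pvARows n rs b = pvBRows n rs b rc cc := by
  intro rs
  induction rs with
  | nil => intro b rc cc _ _ _; rfl
  | cons r rs ih =>
    intro b rc cc hmem hwf hinv
    have hr : r < b.length := hmem r (List.mem_cons_self ..)
    obtain ⟨heq, hwf', hinv', hlen⟩ := inner_lockstep n w r
      (List.range (b.getD r []).length) b rc cc
      (by
        intro c hcmem
        rw [List.mem_range] at hcmem
        have : (b.getD r []).length = w := by
          rw [List.getD_eq_getElem _ _ hr]
          exact (hwf _ (List.getElem_mem hr)).1
        omega)
      hwf hinv hr
    show (match pvACols n r (List.range (b.getD r []).length) b with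
          | (true, b') => some b'
          | (false, b') => pvARows n rs b') =
         (match pvBCols n r (List.range (b.getD r []).length) b rc cc with
          | (true, b', _, _) => some b'
          | (false, b', rc', cc') => pvBRows n rs b' rc' cc')
    rw [heq]
    cases hB : pvBCols n r (List.range (b.getD r []).length) b rc cc with
    | mk fst rest =>
      obtain ⟨b', rc', cc'⟩ := rest
      rw [hB] at hwf' hinv' hlen
      cases fst
      · have hlen' : b'.length = b.length := hlen
        exact ih b' rc' cc'
          (fun r' h => by have := hmem r' (List.mem_cons_of_mem _ h); omega) hwf' hinv'
      · rfl

-- ===== VERDICT (by name: the statement is the Claim_ definition above) =====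
theorem process_board_spec : Claim_equal_process_board := by
  intro board n _hdom hpre
  unfold Spec_process_board
  obtain ⟨hrect, hcell⟩ := hpre
  set w := (board.headD []).length with hw
  have hwf : gWF w board := fun row hm => ⟨hrect row hm, hcell row hm⟩
  have hinv : gInv w board (board.map pvCntRow) ((List.range w).map (pvCntCol board)) := by
    refine ⟨by simp, by simp, ?_, ?_⟩
    · intro i hi
      rw [List.getD_eq_getElem _ _ (by simpa using hi), List.getElem_map,
        List.getD_eq_getElem _ _ hi, cntRow_eq]
    · intro c hc
      rw [List.getD_eq_getElem _ _ (by simpa using hc), List.getElem_map, List.getElem_range,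
        cntCol_eq]
  show process_board board n = process_board_alt board n
  unfold process_board process_board_alt
  exact outer_lockstep n w (List.range board.length) board _ _
    (fun r h => List.mem_range.mp h) hwf hinv
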